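-- pv_equiv track=rewrite | github.com/experiencenow-ai/infra | scripts/restore_citizens.py | separate_by_date
-- ===== SOURCE A (Python) =====
-- from collections import defaultdict
--
-- def separate_by_date(entries: list) -> dict:
--     """Separate entries by date for writing to daily files."""
--     by_date = defaultdict(list)
--     for entry in entries:
--         ts = entry.get("timestamp", "")
--         if ts:
--             date = ts[:10]  # YYYY-MM-DD
--             by_date[date].append(entry)
--     return dict(by_date)
-- ===== SOURCE B (Python) =====
-- def separate_by_date(entries: list) -> dict:
--     """Separate entries by date for writing to daily files."""
--     def key(e):
--         ts = e.get("timestamp", "")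
--         return ts[:10] if ts else None
--     dates = list(dict.fromkeys(k for k in map(key, entries) if k is not None))
--     return {d: [e for e in entries if key(e) == d] for d in dates}
-- ===== Notes on version B (the rewrite author's own statement) =====
-- stated objective: alternative
-- what changed: Replaces the defaultdict accumulation loop with a two-pass decomposition: first collect the distinct date keys in first-occurrence order via dict.fromkeys, then build each group by filtering the entry list per date.
import Mathlib
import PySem

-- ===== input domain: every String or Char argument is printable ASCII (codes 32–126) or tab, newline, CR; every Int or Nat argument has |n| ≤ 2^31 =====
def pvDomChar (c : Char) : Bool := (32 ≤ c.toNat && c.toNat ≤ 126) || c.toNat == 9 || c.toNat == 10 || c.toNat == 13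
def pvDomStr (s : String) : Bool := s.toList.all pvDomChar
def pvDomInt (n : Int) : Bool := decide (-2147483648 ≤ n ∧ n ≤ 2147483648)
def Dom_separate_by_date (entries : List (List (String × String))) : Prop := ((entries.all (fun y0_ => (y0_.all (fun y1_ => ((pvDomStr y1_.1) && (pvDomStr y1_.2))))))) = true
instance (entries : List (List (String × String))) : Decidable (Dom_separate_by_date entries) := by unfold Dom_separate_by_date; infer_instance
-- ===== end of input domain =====

-- B replaces A's defaultdict accumulation loop with a two-pass decomposition
-- (distinct dates in first-occurrence order, then one filter per date); alternative, not faster.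

-- ===== PORT A =====
def separate_by_date (entries : List (List (String × String))) : List (String × List (List (String × String))) :=
  (entries.foldl (fun by_date entry =>
      let ts := (PySem.Dict.mk entry).getD "timestamp" ""
      if ts ≠ "" then
        let date := PySem.Str.slice ts none (some 10)
        by_date.modify date [] (· ++ [entry])
      else by_date)
    (PySem.Dict.empty : PySem.Dict String (List (List (String × String))))).items

-- ===== PORT B =====
-- helper: the inner 'key(e)' of Source B
def sbdKey (e : List (String × String)) : Option String :=
  let ts := (PySem.Dict.mk e).getD "timestamp" ""
  if ts ≠ "" then some (PySem.Str.slice ts none (some 10)) else none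

def separate_by_date_alt (entries : List (List (String × String))) : List (String × List (List (String × String))) :=
  let dates := PySem.List.dedup (entries.filterMap sbdKey)
  dates.map (fun d => (d, entries.filter (fun e => sbdKey e == some d)))

-- ===== PRECONDITION & SPEC =====
def Spec_separate_by_date (entries : List (List (String × String))) (out : List (String × List (List (String × String)))) : Prop := out = separate_by_date_alt entries
instance (entries : List (List (String × String))) (out : List (String × List (List (String × String)))) : Decidable (Spec_separate_by_date entries out) := by unfold Spec_separate_by_date; infer_instance

-- ===== CLAIM (what is proved, stated in full; the proofs are below) =====
def Claim_equal_separate_by_date : Prop := ∀ (entries : List (List (String × String))), Dom_separate_by_date entries → Spec_separate_by_date entries (separate_by_date entries)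

-- ===== LEMMAS AND PROOFS =====

-- the key function of B applied through the guard of A's loop
def sbdKeyVal (e : List (String × String)) : String :=
  PySem.Str.slice ((PySem.Dict.mk e).getD "timestamp" "") none (some 10)

def sbdPred (e : List (String × String)) : Bool :=
  (PySem.Dict.mk e).getD "timestamp" "" ≠ ""

lemma sbdKey_eq (e : List (String × String)) :
    sbdKey e = if sbdPred e then some (sbdKeyVal e) else none := by
  simp [sbdKey, sbdPred, sbdKeyVal]

lemma filterMap_sbdKey (entries : List (List (String × String))) :
    entries.filterMap sbdKey = (entries.filter sbdPred).map sbdKeyVal := by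
  induction entries with
  | nil => rfl
  | cons e es ih =>
    rw [List.filterMap_cons, List.filter_cons, sbdKey_eq e]
    by_cases h : sbdPred e = true <;> simp [h, ih]

-- A's fold, restated as an unconditional modify-fold over the filtered list
lemma foldA_eq (entries : List (List (String × String)))
    (d : PySem.Dict String (List (List (String × String)))) :
    entries.foldl (fun by_date entry =>
      let ts := (PySem.Dict.mk entry).getD "timestamp" ""
      if ts ≠ "" then
        by_date.modify (PySem.Str.slice ts none (some 10)) [] (· ++ [entry])
      else by_date) d
    = (entries.filter sbdPred).foldl
        (fun by_date entry => by_date.modify (sbdKeyVal entry) [] (· ++ [entry])) d := by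
  induction entries generalizing d with
  | nil => rfl
  | cons e es ih =>
    by_cases h : sbdPred e = true
    · simp only [List.foldl_cons, List.filter_cons, h, if_pos]
      rw [ih]
      congr 1
      simp [sbdPred] at h
      simp [sbdKeyVal, h]
    · simp only [List.foldl_cons, List.filter_cons, h]
      simp only [sbdPred, ne_eq, decide_not, Bool.not_eq_true', decide_eq_false_iff_not,
        Decidable.not_not] at h
      simp only [h, ne_eq, not_true_eq_false, if_false]
      exact ih d

-- ===== VERDICT (by name: the statement is the Claim_ definition above) =====
lemma group_eq (entries : List (List (String × String))) (k : String) :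
    entries.filter (fun e => sbdKey e == some k)
      = (entries.filter sbdPred).filter (fun e => sbdKeyVal e == k) := by
  rw [List.filter_filter]
  apply List.filter_congr
  intro e _
  rw [sbdKey_eq e]
  by_cases h : sbdPred e = true <;> simp [h]

theorem separate_by_date_spec : Claim_equal_separate_by_date := by
  intro entries _
  show separate_by_date entries = separate_by_date_alt entries
  unfold separate_by_date separate_by_date_alt
  rw [foldA_eq]
  rw [PySem.Dict.items_eq_map_keys _
    (PySem.Dict.nodup_keys_foldl_modify_key (entries.filter sbdPred) sbdKeyVal []
      (fun _ e x => x ++ [e]) PySem.Dict.empty (by simp [PySem.Dict.empty, PySem.Dict.keys])) []]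
  rw [PySem.Dict.keys_foldl_modify_key (entries.filter sbdPred) sbdKeyVal []
      (fun _ e x => x ++ [e]) PySem.Dict.empty]
  rw [filterMap_sbdKey, PySem.List.dedup_eq_ofList]
  have hkeys : PySem.Set.update (PySem.Dict.empty :
      PySem.Dict String (List (List (String × String)))).keys
      ((entries.filter sbdPred).map sbdKeyVal)
      = PySem.Set.ofList ((entries.filter sbdPred).map sbdKeyVal) := rfl
  rw [hkeys]
  apply List.map_congr_left
  intro k _
  congr 1
  rw [group_eq]
  have h2 := PySem.Dict.getD_foldl_modify_append
      ((entries.filter sbdPred).map (fun e => (sbdKeyVal e, e))) PySem.Dict.empty k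
  rw [List.foldl_map] at h2
  rw [h2]
  simp [List.filter_map, Function.comp_def]
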